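-- pv_equiv track=rewrite | github.com/ToddMorrill/knowledge-graphs | kg/ner/supervised.py | _tags_since_dt
-- ===== SOURCE A (Python) =====
-- def _tags_since_dt(sentence: list, i: int) -> str:
--     """Utility function to compute the 'tags since last determiner'.
--
--     Args:
--         sentence (list): Tuples of (word, pos).
--         i (int): Sentence index.
--
--     Returns:
--         str: '+' delimited string of POS tags.
--     """
--     tags = set()
--     for word, pos in sentence[:i]:
--         if pos == 'DT':
--             tags = set()
--         else:
--             tags.add(pos)
--     return '+'.join(sorted(tags))
-- ===== SOURCE B (Python) =====
-- def _tags_since_dt(sentence: list, i: int) -> str: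
--     """Reverse scan: collect POS tags walking back from i, stopping at the last 'DT'."""
--     tags = set()
--     for word, pos in reversed(sentence[:i]):
--         if pos == 'DT':
--             break
--         tags.add(pos)
--     return '+'.join(sorted(tags))
-- ===== Notes on version B (the rewrite author's own statement) =====
-- stated objective: idiomatic
-- what changed: Replaces the forward scan that resets the tag set at every determiner with a reverse scan over sentence[:i] that collects tags and breaks at the first (i.e. last) 'DT', so no work is redone.
import Mathlib
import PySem

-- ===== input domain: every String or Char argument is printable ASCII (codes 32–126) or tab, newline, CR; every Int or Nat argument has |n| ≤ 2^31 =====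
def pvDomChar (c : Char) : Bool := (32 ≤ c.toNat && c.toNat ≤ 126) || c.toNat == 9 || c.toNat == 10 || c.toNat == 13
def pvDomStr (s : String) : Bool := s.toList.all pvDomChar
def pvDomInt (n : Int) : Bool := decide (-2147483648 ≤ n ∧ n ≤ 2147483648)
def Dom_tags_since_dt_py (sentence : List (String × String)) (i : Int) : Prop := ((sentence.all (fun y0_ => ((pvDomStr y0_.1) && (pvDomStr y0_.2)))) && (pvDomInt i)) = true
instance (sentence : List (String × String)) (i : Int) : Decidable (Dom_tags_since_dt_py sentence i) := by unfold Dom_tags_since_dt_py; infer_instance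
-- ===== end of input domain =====

-- B replaces A's forward scan (which resets the set at every 'DT') by a reverse scan over
-- sentence[:i] that stops at the first 'DT' seen (the last determiner); same result, more idiomatic.

-- ===== PORT A =====
def tags_since_dt_py (sentence : List (String × String)) (i : Int) : String :=
  let tags : PySem.Set String :=
    (PySem.List.slice sentence none (some i)).foldl
      (fun tags wp => if wp.2 == "DT" then PySem.Set.empty else PySem.Set.add tags wp.2)
      PySem.Set.empty
  PySem.Str.join "+" (PySem.List.sorted tags (fun x => x) false)

-- ===== PORT B =====
-- the loop 'for word, pos in reversed(...): if pos == 'DT': break; tags.add(pos)'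
def pvAltLoop : List (String × String) → PySem.Set String → PySem.Set String
  | [], tags => tags
  | wp :: rest, tags =>
      if wp.2 == "DT" then tags else pvAltLoop rest (PySem.Set.add tags wp.2)

def tags_since_dt_py_alt (sentence : List (String × String)) (i : Int) : String :=
  let tags := pvAltLoop (PySem.List.slice sentence none (some i)).reverse PySem.Set.empty
  PySem.Str.join "+" (PySem.List.sorted tags (fun x => x) false)

-- ===== PRECONDITION & SPEC =====
def Spec_tags_since_dt_py (sentence : List (String × String)) (i : Int) (out : String) : Prop := out = tags_since_dt_py_alt sentence i
instance (sentence : List (String × String)) (i : Int) (out : String) : Decidable (Spec_tags_since_dt_py sentence i out) := by unfold Spec_tags_since_dt_py; infer_instance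

-- ===== CLAIM (what is proved, stated in full; the proofs are below) =====
def Claim_equal_tags_since_dt_py : Prop := ∀ (sentence : List (String × String)) (i : Int), Dom_tags_since_dt_py sentence i → Spec_tags_since_dt_py sentence i (tags_since_dt_py sentence i)

-- ===== LEMMAS AND PROOFS =====

-- abbreviation for A's fold step applied to a whole list
def pvAFold (l : List (String × String)) (s : PySem.Set String) : PySem.Set String :=
  l.foldl (fun tags wp => if wp.2 == "DT" then PySem.Set.empty else PySem.Set.add tags wp.2) s

theorem pvAFold_append (l : List (String × String)) (a : String × String) (s : PySem.Set String) :
    pvAFold (l ++ [a]) s =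
      (if a.2 == "DT" then PySem.Set.empty else PySem.Set.add (pvAFold l s) a.2) := by
  simp [pvAFold]

-- the tags B collects from the reversed list, as a plain list
def pvTail (rl : List (String × String)) : List String :=
  (rl.takeWhile (fun wp => !(wp.2 == "DT"))).map Prod.snd

theorem mem_pvAFold (l : List (String × String)) (s : PySem.Set String) (x : String) :
    x ∈ pvAFold l s ↔
      x ∈ pvTail l.reverse ∨ ((∀ wp ∈ l, wp.2 ≠ "DT") ∧ x ∈ s) := by
  induction l using List.reverseRecOn generalizing s with
  | nil => simp [pvAFold, pvTail]
  | append_singleton l a ih =>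
      rw [pvAFold_append]
      have hrev : (l ++ [a]).reverse = a :: l.reverse := by simp
      by_cases h : a.2 = "DT"
      · rw [if_pos (by simp [h])]
        simp [hrev, pvTail, h, PySem.Set.empty]
        exact fun hall _ => hall a.1 a.2 (Or.inr (by simp)) h
      · rw [if_neg (by simp [h]), PySem.Set.mem_add, ih, hrev]
        have htail : pvTail (a :: l.reverse) = a.2 :: pvTail l.reverse := by
          simp [pvTail, h]
        rw [htail]
        simp only [List.mem_cons, List.forall_mem_append]
        have ha : ∀ (y : String × String), y = a ∨ y ∈ ([] : List (String × String)) → y.2 ≠ "DT" := by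
          rintro y (rfl | hy)
          · exact h
          · simp at hy
        tauto

theorem nodup_pvAFold (l : List (String × String)) (s : PySem.Set String) (hs : s.Nodup) :
    (pvAFold l s).Nodup := by
  induction l generalizing s with
  | nil => exact hs
  | cons a t ih =>
      simp only [pvAFold, List.foldl_cons]
      by_cases h : a.2 = "DT"
      · rw [if_pos (by simp [h])]
        exact ih _ (by simp [PySem.Set.empty])
      · rw [if_neg (by simp [h])]
        exact ih _ (PySem.Set.nodup_add _ _ hs)

theorem mem_pvAltLoop (rl : List (String × String)) (acc : PySem.Set String) (x : String) :
    x ∈ pvAltLoop rl acc ↔ x ∈ acc ∨ x ∈ pvTail rl := by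
  induction rl generalizing acc with
  | nil => simp [pvAltLoop, pvTail]
  | cons a t ih =>
      by_cases h : a.2 = "DT"
      · simp [pvAltLoop, h, pvTail]
      · simp [pvAltLoop, h, ih, PySem.Set.mem_add, pvTail]
        tauto

theorem nodup_pvAltLoop (rl : List (String × String)) (acc : PySem.Set String)
    (hs : acc.Nodup) : (pvAltLoop rl acc).Nodup := by
  induction rl generalizing acc with
  | nil => exact hs
  | cons a t ih =>
      by_cases h : a.2 = "DT"
      · simpa [pvAltLoop, h] using hs
      · simp only [pvAltLoop]
        rw [if_neg (by simp [h])]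
        exact ih _ (PySem.Set.nodup_add _ _ hs)

-- ===== VERDICT (by name: the statement is the Claim_ definition above) =====
theorem tags_since_dt_py_spec : Claim_equal_tags_since_dt_py := by
  intro sentence i _
  unfold Spec_tags_since_dt_py tags_since_dt_py tags_since_dt_py_alt
  set l := PySem.List.slice sentence none (some i) with hl
  have hperm : (pvAFold l PySem.Set.empty).Perm (pvAltLoop l.reverse PySem.Set.empty) := by
    rw [List.perm_ext_iff_of_nodup
      (nodup_pvAFold l _ (by simp [PySem.Set.empty]))
      (nodup_pvAltLoop l.reverse _ (by simp [PySem.Set.empty]))]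
    intro x
    rw [mem_pvAFold, mem_pvAltLoop]
    simp [PySem.Set.empty]
  have := PySem.List.sorted_eq_sorted_of_perm
    (pvAFold l PySem.Set.empty) (pvAltLoop l.reverse PySem.Set.empty)
    (fun x => x) (fun _ _ h => h) hperm
  show PySem.Str.join "+" (PySem.List.sorted (pvAFold l PySem.Set.empty) (fun x => x) false) = _
  rw [this]
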